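-- pv_equiv track=rewrite | github.com/mementomoryn/twitter-apk | utils.py | format_changelog
-- ===== SOURCE A (Python) =====
-- def format_changelog(changelog: str, sections: bool) -> str:
--     if sections is False:
--         replace: str = changelog.replace("# ", "### ")
--         loglist: str = "\r\n\r\n".join(replace.split("\r\n\r\n")[:-3]).split("### ")[1:]
--     else:
--         loglist: str = changelog.split("### ")[1:]
--     append: str = ["### " + log for log in loglist]
--     join: str = ''.join(append)
--
--     return join
-- ===== SOURCE B (Python) =====
-- def format_changelog(changelog: str, sections: bool) -> str:
--     if sections:
--         s = changelog
--     else: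
--         s = "\r\n\r\n".join(changelog.replace("# ", "### ").split("\r\n\r\n")[:-3])
--     i = s.find("### ")
--     return "" if i == -1 else s[i:]
-- ===== Notes on version B (the rewrite author's own statement) =====
-- stated objective: simpler
-- what changed: Replaces the split-on-'### '/re-prefix/join reconstruction of the section tail by a single find of the first '### ' and one slice from that index, so no list of pieces is built and no string is reassembled.
import Mathlib
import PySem

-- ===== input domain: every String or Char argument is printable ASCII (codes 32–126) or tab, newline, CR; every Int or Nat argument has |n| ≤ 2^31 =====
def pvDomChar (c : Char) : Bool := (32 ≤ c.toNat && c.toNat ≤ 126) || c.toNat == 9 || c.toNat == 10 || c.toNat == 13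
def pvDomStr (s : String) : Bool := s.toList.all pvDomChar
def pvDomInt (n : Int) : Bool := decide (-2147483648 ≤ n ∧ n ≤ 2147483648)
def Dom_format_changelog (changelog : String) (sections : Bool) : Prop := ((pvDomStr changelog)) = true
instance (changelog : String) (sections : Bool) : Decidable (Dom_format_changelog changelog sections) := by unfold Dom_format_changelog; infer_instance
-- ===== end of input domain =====

-- B replaces A's split-on-"### "/re-prefix/join reconstruction of the section tail by a single
-- find of the first "### " plus one slice from that index (objective: simpler).

-- ===== PORT A =====
def format_changelog (changelog : String) (sections : Bool) : String :=
  let loglist : List String :=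
    if sections = false then
      let rep : String := PySem.Str.replace changelog "# " "### "
      PySem.List.slice
        ((PySem.Str.split?
            (PySem.Str.join "\r\n\r\n"
              (PySem.List.slice ((PySem.Str.split? rep "\r\n\r\n").getD []) none (some (-3))))
            "### ").getD [])
        (some 1) none
    else
      PySem.List.slice ((PySem.Str.split? changelog "### ").getD []) (some 1) none
  let append : List String := loglist.map (fun log => "### " ++ log)
  PySem.Str.join "" append

-- ===== PORT B =====
def format_changelog_alt (changelog : String) (sections : Bool) : String :=
  let s : String :=
    if sections then changelog
    else
      PySem.Str.join "\r\n\r\n"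
        (PySem.List.slice
          ((PySem.Str.split? (PySem.Str.replace changelog "# " "### ") "\r\n\r\n").getD [])
          none (some (-3)))
  let i : Int := PySem.Str.find s "### "
  if i = -1 then "" else PySem.Str.slice s (some i) none

-- ===== PRECONDITION & SPEC =====
def Spec_format_changelog (changelog : String) (sections : Bool) (out : String) : Prop := out = format_changelog_alt changelog sections
instance (changelog : String) (sections : Bool) (out : String) : Decidable (Spec_format_changelog changelog sections out) := by unfold Spec_format_changelog; infer_instance

-- ===== CLAIM (what is proved, stated in full; the proofs are below) =====
def Claim_equal_format_changelog : Prop := ∀ (changelog : String) (sections : Bool), Dom_format_changelog changelog sections → Spec_format_changelog changelog sections (format_changelog changelog sections)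

-- ===== LEMMAS AND PROOFS =====

theorem pv_go_acc (sep : List Char) (fuel : Nat) :
    ∀ (l cur : List Char) (acc : List (List Char)),
      PySem.Chars.splitOn.go sep fuel l cur acc
        = acc.reverse ++ PySem.Chars.splitOn.go sep fuel l cur [] := by
  induction fuel with
  | zero => intro l cur acc; simp [PySem.Chars.splitOn.go]
  | succ n ih =>
    intro l cur acc
    cases l with
    | nil => simp [PySem.Chars.splitOn.go]
    | cons c rest =>
      rw [PySem.Chars.splitOn.go, PySem.Chars.splitOn.go]
      by_cases h : sep.isPrefixOf (c :: rest) = true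
      · simp only [h, if_true]
        rw [ih _ _ (cur.reverse :: acc), ih _ _ [cur.reverse]]
        simp
      · simp only [h]
        exact ih _ _ acc

theorem pv_go_all (sep : List Char) (hsep : sep ≠ []) (fuel : Nat) :
    ∀ (l cur : List Char), l.length < fuel →
      ((PySem.Chars.splitOn.go sep fuel l cur []).map (fun p => sep ++ p)).flatten
        = sep ++ cur.reverse ++ l := by
  induction fuel with
  | zero => intro l cur h; omega
  | succ n ih =>
    intro l cur h
    cases l with
    | nil => simp [PySem.Chars.splitOn.go]
    | cons c rest =>
      rw [PySem.Chars.splitOn.go]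
      by_cases hp : sep.isPrefixOf (c :: rest) = true
      · simp only [hp, if_true]
        rw [pv_go_acc]
        have hlen : (List.drop sep.length (c :: rest)).length < n := by
          have h1 : 0 < sep.length := List.length_pos_of_ne_nil hsep
          simp only [List.length_drop, List.length_cons]
          simp only [List.length_cons] at h
          omega
        simp only [List.map_append, List.flatten_append]
        rw [ih _ [] hlen]
        have hpre := List.isPrefixOf_iff_prefix.mp hp
        obtain ⟨t, ht⟩ := hpre
        simp [← ht, List.drop_left']
      · rw [Bool.not_eq_true] at hp
        simp only [hp, Bool.false_eq_true, if_false]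
        have hlen : rest.length < n := by simp only [List.length_cons] at h; omega
        rw [ih rest (c :: cur) hlen]
        simp

theorem pv_find_shift (sub : List Char) :
    ∀ (l : List Char) (k : Nat),
      PySem.Chars.find.go sub l k
        = if PySem.Chars.find.go sub l 0 = -1 then -1 else PySem.Chars.find.go sub l 0 + k := by
  intro l
  induction l with
  | nil =>
    intro k
    simp only [PySem.Chars.find.go]
    by_cases h : sub.isEmpty = true <;> simp [h]
  | cons c rest ih =>
    intro k
    rw [PySem.Chars.find.go, PySem.Chars.find.go]
    by_cases hp : sub.isPrefixOf (c :: rest) = true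
    · simp [hp]
    · rw [Bool.not_eq_true] at hp
      simp only [hp, Bool.false_eq_true, if_false]
      rw [ih (k + 1), ih 1]
      by_cases h0 : PySem.Chars.find.go sub rest 0 = -1
      · simp [h0]
      · simp only [h0, if_false]
        have hne : ¬ (PySem.Chars.find.go sub rest 0 + (1 : Nat) = -1) := by
          have := PySem.Chars.neg_one_le_find (s := rest) (sub := sub)
          simp only [PySem.Chars.find] at this
          push_cast
          omega
        rw [if_neg hne]
        push_cast
        ring

theorem pv_find_go_nonneg (sub l : List Char) (h : PySem.Chars.find.go sub l 0 ≠ -1) :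
    0 ≤ PySem.Chars.find.go sub l 0 := by
  have := PySem.Chars.neg_one_le_find (s := l) (sub := sub)
  simp only [PySem.Chars.find] at this
  omega

theorem pv_go_key (sep : List Char) (hsep : sep ≠ []) (fuel : Nat) :
    ∀ (l cur : List Char), l.length < fuel →
      (((PySem.Chars.splitOn.go sep fuel l cur []).drop 1).map (fun p => sep ++ p)).flatten
        = if PySem.Chars.find.go sep l 0 = -1 then []
          else l.drop (PySem.Chars.find.go sep l 0).toNat := by
  induction fuel with
  | zero => intro l cur h; omega
  | succ n ih =>
    intro l cur h
    cases l with
    | nil =>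
      have hemp : sep.isEmpty = false := by
        cases sep with
        | nil => exact absurd rfl hsep
        | cons a b => rfl
      simp [PySem.Chars.splitOn.go, PySem.Chars.find.go, hemp]
    | cons c rest =>
      rw [PySem.Chars.splitOn.go, PySem.Chars.find.go]
      by_cases hp : sep.isPrefixOf (c :: rest) = true
      · simp only [hp, if_true]
        rw [pv_go_acc]
        have h1 : 0 < sep.length := List.length_pos_of_ne_nil hsep
        have hlen : (List.drop sep.length (c :: rest)).length < n := by
          simp only [List.length_drop, List.length_cons]
          simp only [List.length_cons] at h
          omega
        simp only [List.reverse_singleton, List.singleton_append, List.drop_succ_cons,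
          List.drop_zero]
        rw [pv_go_all sep hsep n _ [] hlen]
        have hpre := List.isPrefixOf_iff_prefix.mp hp
        obtain ⟨t, ht⟩ := hpre
        have h0 : ¬ (((0 : Nat) : Int) = -1) := by omega
        rw [if_neg h0]
        simp only [Nat.cast_zero, Int.toNat_zero, List.drop_zero]
        simp [← ht, List.drop_left']
      · rw [Bool.not_eq_true] at hp
        simp only [hp, Bool.false_eq_true, if_false]
        have hlen : rest.length < n := by simp only [List.length_cons] at h; omega
        rw [ih rest (c :: cur) hlen, pv_find_shift sep rest 1]
        by_cases h0 : PySem.Chars.find.go sep rest 0 = -1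
        · simp [h0]
        · have hnn := pv_find_go_nonneg sep rest h0
          have hne : ¬ (PySem.Chars.find.go sep rest 0 + (1:Nat) = -1) := by push_cast; omega
          simp only [if_neg h0, if_neg hne]
          have : (PySem.Chars.find.go sep rest 0 + ((1:Nat):Int)).toNat
              = (PySem.Chars.find.go sep rest 0).toNat + 1 := by omega
          rw [this]
          simp

theorem pv_join_nil_flatten (ps : List (List Char)) :
    PySem.Chars.join [] ps = ps.flatten := by
  simp only [PySem.Chars.join]
  induction ps with
  | nil => simp [List.intercalate]
  | cons p ps ih =>
    cases ps with
    | nil => simp [List.intercalate]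
    | cons q qs =>
      simp only [List.intercalate, List.intersperse] at *
      simp_all

theorem pv_chars_key (sep l : List Char) (hsep : sep ≠ []) :
    PySem.Chars.join [] (((PySem.Chars.splitOn l sep).drop 1).map (fun p => sep ++ p))
      = if PySem.Chars.find l sep = -1 then [] else l.drop (PySem.Chars.find l sep).toNat := by
  rw [pv_join_nil_flatten, PySem.Chars.splitOn, PySem.Chars.find]
  exact pv_go_key sep hsep (l.length + 1) l [] (by omega)

theorem pv_str_key (s : String) :
    PySem.Str.join ""
        ((PySem.List.slice ((PySem.Str.split? s "### ").getD []) (some 1) none).map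
          (fun log => "### " ++ log))
      = if PySem.Str.find s "### " = -1 then ""
        else PySem.Str.slice s (some (PySem.Str.find s "### ")) none := by
  have hsep : ("### " : String).toList ≠ [] := by decide
  have hsplit : PySem.Str.split? s "### "
      = some ((PySem.Chars.splitOn s.toList ("### ".toList)).map String.ofList) := by
    simp [PySem.Str.split?, PySem.Chars.split?]
  rw [hsplit]
  simp only [Option.getD_some]
  apply String.toList_inj.mp
  have hL : (PySem.Str.join ""
      ((PySem.List.slice ((PySem.Chars.splitOn s.toList ("### ".toList)).map String.ofList)
          (some 1) none).map (fun log => "### " ++ log))).toList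
      = PySem.Chars.join [] (((PySem.Chars.splitOn s.toList ("### ".toList)).drop 1).map
          (fun p => "### ".toList ++ p)) := by
    rw [PySem.List.slice_from_one]
    simp [PySem.Str.toList_join, List.map_map, Function.comp_def, String.toList_append]

  rw [hL, pv_chars_key _ _ hsep]
  by_cases hf : PySem.Str.find s "### " = -1
  · rw [if_pos hf]
    rw [PySem.Str.find_eq] at hf
    rw [if_pos hf]
    rfl
  · rw [if_neg hf]
    rw [PySem.Str.find_eq] at hf
    rw [if_neg hf]
    have hnn : 0 ≤ PySem.Chars.find s.toList ("### ".toList) := by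
      have := PySem.Chars.neg_one_le_find (s := s.toList) (sub := "### ".toList)
      omega
    rw [PySem.Str.toList_slice, PySem.Chars.slice_eq_listSlice, PySem.Str.find_eq,
      PySem.List.slice_from _ hnn]

-- ===== VERDICT (by name: the statement is the Claim_ definition above) =====
theorem format_changelog_spec : Claim_equal_format_changelog := by
  intro changelog sections _
  unfold Spec_format_changelog format_changelog format_changelog_alt
  cases sections <;> simp only [if_true, if_false, Bool.false_eq_true, Bool.true_eq_false] <;>
    exact pv_str_key _
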